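-- pv_equiv track=rewrite | github.com/hANjishuai/Graduation_project | test/src/fasta_tools.py | generate_paratope_formats
-- ===== SOURCE A (Python) =====
-- def generate_paratope_formats(cdr_positions):
--     """生成HADDOCK和PyMOL格式的paratope定义"""
--     # 收集所有位置
--     all_positions = []
--     for (start, end) in cdr_positions.values():
--         all_positions.extend(range(start, end + 1))
--
--     # 排序并去重
--     all_positions = sorted(set(all_positions))
--
--     # 生成HADDOCK格式 (空格分隔)
--     haddock_format = " ".join(map(str, all_positions))
--
--     # 生成PyMOL格式 (加号分隔)
--     pymol_format = "+".join(map(str, all_positions))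
--
--     return haddock_format, pymol_format
-- ===== SOURCE B (Python) =====
-- def generate_paratope_formats(cdr_positions):
--     """生成HADDOCK和PyMOL格式的paratope定义"""
--     # non-empty intervals, sorted by start
--     intervals = sorted((v for v in cdr_positions.values() if v[0] <= v[1]),
--                        key=lambda t: t[0])
--     # merge overlapping or adjacent intervals
--     merged = []
--     for s, e in intervals:
--         if merged and s <= merged[-1][1] + 1:
--             if merged[-1][1] < e:
--                 merged[-1] = (merged[-1][0], e)
--         else:
--             merged.append((s, e))
--     # expand the coalesced ranges: already sorted and duplicate-free
--     positions = []
--     for s, e in merged: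
--         positions.extend(range(s, e + 1))
--     strs = list(map(str, positions))
--     return " ".join(strs), "+".join(strs)
-- ===== Notes on version B (the rewrite author's own statement) =====
-- stated objective: alternative
-- what changed: Instead of dumping every position of every range into a list and calling sorted(set(...)), B sorts the non-empty intervals by start, merges overlapping or adjacent ones, and expands the merged ranges, which yields the sorted duplicate-free position list directly.
import Mathlib
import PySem

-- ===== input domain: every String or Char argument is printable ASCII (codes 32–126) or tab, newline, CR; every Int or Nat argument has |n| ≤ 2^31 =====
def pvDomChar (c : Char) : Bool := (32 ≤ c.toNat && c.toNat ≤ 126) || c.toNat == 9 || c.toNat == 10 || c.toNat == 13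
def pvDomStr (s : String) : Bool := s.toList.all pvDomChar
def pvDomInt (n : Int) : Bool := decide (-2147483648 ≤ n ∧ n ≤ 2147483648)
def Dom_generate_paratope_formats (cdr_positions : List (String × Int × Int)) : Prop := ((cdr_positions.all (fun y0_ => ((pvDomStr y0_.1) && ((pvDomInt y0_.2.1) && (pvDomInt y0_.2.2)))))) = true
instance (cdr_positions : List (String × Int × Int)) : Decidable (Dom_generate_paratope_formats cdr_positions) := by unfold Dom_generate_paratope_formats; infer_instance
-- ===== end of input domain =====

-- B sorts the non-empty intervals, merges overlapping/adjacent ones, then expands the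
-- merged ranges, so the position list comes out sorted and duplicate-free without
-- building a set of points or sorting them (objective: alternative algorithm).

-- ===== PORT A =====
def generate_paratope_formats (cdr_positions : List (String × Int × Int)) : String × String :=
  -- all_positions = []; for (start, end) in cdr_positions.values(): all_positions.extend(range(start, end+1))
  let all_positions : List Int :=
    ((PySem.Dict.ofList cdr_positions).values).foldl
      (fun acc se => acc ++ PySem.List.pyRange se.1 (se.2 + 1) 1) []
  -- all_positions = sorted(set(all_positions))
  let all_sorted := PySem.List.sorted (PySem.Set.ofList all_positions) (fun x => x) false
  (PySem.Str.join " " (all_sorted.map PySem.Int.toStr),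
   PySem.Str.join "+" (all_sorted.map PySem.Int.toStr))

-- ===== PORT B =====
-- one step of Source B's merging loop: merged[-1] is acc.getLast?, "merged[-1] = …" is dropLast ++ […]
def pvMergeStep (acc : List (Int × Int)) (t : Int × Int) : List (Int × Int) :=
  match acc.getLast? with
  | some (ps, pe) =>
    if t.1 ≤ pe + 1 then
      if pe < t.2 then acc.dropLast ++ [(ps, t.2)] else acc
    else acc ++ [t]
  | none => [t]

def generate_paratope_formats_alt (cdr_positions : List (String × Int × Int)) : String × String :=
  let intervals :=
    PySem.List.sorted
      (((PySem.Dict.ofList cdr_positions).values).filter (fun t => decide (t.1 ≤ t.2)))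
      (fun t => t.1) false
  let merged := intervals.foldl pvMergeStep []
  let positions : List Int :=
    merged.foldl (fun acc t => acc ++ PySem.List.pyRange t.1 (t.2 + 1) 1) []
  let strs := positions.map PySem.Int.toStr
  (PySem.Str.join " " strs, PySem.Str.join "+" strs)

-- ===== PRECONDITION & SPEC =====
def Spec_generate_paratope_formats (cdr_positions : List (String × Int × Int)) (out : String × String) : Prop := out = generate_paratope_formats_alt cdr_positions
instance (cdr_positions : List (String × Int × Int)) (out : String × String) : Decidable (Spec_generate_paratope_formats cdr_positions out) := by unfold Spec_generate_paratope_formats; infer_instance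

-- ===== CLAIM (what is proved, stated in full; the proofs are below) =====
def Claim_equal_generate_paratope_formats : Prop := ∀ (cdr_positions : List (String × Int × Int)), Dom_generate_paratope_formats cdr_positions → Spec_generate_paratope_formats cdr_positions (generate_paratope_formats cdr_positions)

-- ===== LEMMAS AND PROOFS =====

-- expansion of a list of intervals into their positions
def pvExpand (l : List (Int × Int)) : List Int :=
  l.flatMap (fun t => PySem.List.pyRange t.1 (t.2 + 1) 1)

theorem mem_pvExpand {x : Int} {l : List (Int × Int)} :
    x ∈ pvExpand l ↔ ∃ t ∈ l, t.1 ≤ x ∧ x ≤ t.2 := by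
  simp only [pvExpand, List.mem_flatMap, PySem.List.mem_pyRange_one]
  constructor
  · rintro ⟨t, ht, h1, h2⟩; exact ⟨t, ht, h1, by omega⟩
  · rintro ⟨t, ht, h1, h2⟩; exact ⟨t, ht, h1, by omega⟩

theorem mem_pvExpand_concat {x : Int} {l : List (Int × Int)} {ps pe : Int} :
    x ∈ pvExpand (l ++ [(ps, pe)]) ↔ x ∈ pvExpand l ∨ (ps ≤ x ∧ x ≤ pe) := by
  simp only [pvExpand, List.flatMap_append, List.mem_append, List.flatMap_cons,
    List.flatMap_nil, List.append_nil, PySem.List.mem_pyRange_one]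
  constructor
  · rintro (h | ⟨h1, h2⟩)
    · exact Or.inl h
    · exact Or.inr ⟨h1, by omega⟩
  · rintro (h | ⟨h1, h2⟩)
    · exact Or.inl h
    · exact Or.inr ⟨h1, by omega⟩

-- the invariant list (everything strictly below ps, then one interval ending at pe) expands strictly increasing
theorem pvInv_pairwise (front : List (Int × Int)) (ps pe : Int)
    (hpw : (pvExpand front).Pairwise (· < ·))
    (hlt : ∀ x ∈ pvExpand front, x < ps) :
    (pvExpand (front ++ [(ps, pe)])).Pairwise (· < ·) := by
  have : pvExpand (front ++ [(ps, pe)]) = pvExpand front ++ PySem.List.pyRange ps (pe + 1) 1 := by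
    simp [pvExpand]
  rw [this]
  refine List.pairwise_append.mpr ⟨hpw, PySem.List.pairwise_lt_pyRange_one ps (pe + 1), ?_⟩
  intro a ha b hb
  have hb' : ps ≤ b := (PySem.List.mem_pyRange_one.mp hb).1
  have := hlt a ha
  omega

-- main invariant lemma for the merging loop
theorem pvMerge_main (ts : List (Int × Int)) :
    ∀ (front : List (Int × Int)) (ps pe : Int),
      ts.Pairwise (fun a b => a.1 ≤ b.1) →
      (∀ t ∈ ts, t.1 ≤ t.2) →
      (∀ t ∈ ts, ps ≤ t.1) →
      ps ≤ pe →
      (pvExpand front).Pairwise (· < ·) →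
      (∀ x ∈ pvExpand front, x < ps) →
      (pvExpand (ts.foldl pvMergeStep (front ++ [(ps, pe)]))).Pairwise (· < ·) ∧
      (∀ x, x ∈ pvExpand (ts.foldl pvMergeStep (front ++ [(ps, pe)])) ↔
        x ∈ pvExpand front ∨ (ps ≤ x ∧ x ≤ pe) ∨ ∃ t ∈ ts, t.1 ≤ x ∧ x ≤ t.2) := by
  induction ts with
  | nil =>
    intro front ps pe _ _ _ h1 hpw hlt
    refine ⟨by simpa using pvInv_pairwise front ps pe hpw hlt, ?_⟩
    intro x
    simp [mem_pvExpand_concat]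
  | cons t rest ih =>
    intro front ps pe hs hne hstart h1 hpw hlt
    have hs_rest : rest.Pairwise (fun a b => a.1 ≤ b.1) := hs.of_cons
    have hs_head : ∀ u ∈ rest, t.1 ≤ u.1 := (List.pairwise_cons.mp hs).1
    have hne_t : t.1 ≤ t.2 := hne t (List.mem_cons_self ..)
    have hstart_t : ps ≤ t.1 := hstart t (List.mem_cons_self ..)
    have hstep : pvMergeStep (front ++ [(ps, pe)]) t =
        if t.1 ≤ pe + 1 then
          (if pe < t.2 then front ++ [(ps, t.2)] else front ++ [(ps, pe)])
        else (front ++ [(ps, pe)]) ++ [t] := by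
      simp [pvMergeStep]
    rw [List.foldl_cons, hstep]
    by_cases hle : t.1 ≤ pe + 1
    · by_cases hlt2 : pe < t.2
      · rw [if_pos hle, if_pos hlt2]
        obtain ⟨c1, c2⟩ := ih front ps t.2 hs_rest (fun u hu => hne u (List.mem_cons_of_mem _ hu))
          (fun u hu => le_trans hstart_t (hs_head u hu)) (by omega) hpw hlt
        refine ⟨c1, fun x => ?_⟩
        rw [c2 x]
        constructor
        · rintro (h | ⟨h1', h2'⟩ | ⟨u, hu, hx⟩)
          · exact Or.inl h
          · by_cases hxpe : x ≤ pe
            · exact Or.inr (Or.inl ⟨h1', hxpe⟩)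
            · exact Or.inr (Or.inr ⟨t, List.mem_cons_self .., by omega⟩)
          · exact Or.inr (Or.inr ⟨u, List.mem_cons_of_mem _ hu, hx⟩)
        · rintro (h | ⟨h1', h2'⟩ | ⟨u, hu, hx⟩)
          · exact Or.inl h
          · exact Or.inr (Or.inl ⟨h1', by omega⟩)
          · rcases List.mem_cons.mp hu with rfl | hu'
            · exact Or.inr (Or.inl ⟨by omega, by omega⟩)
            · exact Or.inr (Or.inr ⟨u, hu', hx⟩)
      · rw [if_pos hle, if_neg hlt2]
        obtain ⟨c1, c2⟩ := ih front ps pe hs_rest (fun u hu => hne u (List.mem_cons_of_mem _ hu))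
          (fun u hu => le_trans hstart_t (hs_head u hu)) h1 hpw hlt
        refine ⟨c1, fun x => ?_⟩
        rw [c2 x]
        constructor
        · rintro (h | ⟨h1', h2'⟩ | ⟨u, hu, hx⟩)
          · exact Or.inl h
          · exact Or.inr (Or.inl ⟨h1', h2'⟩)
          · exact Or.inr (Or.inr ⟨u, List.mem_cons_of_mem _ hu, hx⟩)
        · rintro (h | ⟨h1', h2'⟩ | ⟨u, hu, hx⟩)
          · exact Or.inl h
          · exact Or.inr (Or.inl ⟨h1', h2'⟩)
          · rcases List.mem_cons.mp hu with rfl | hu'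
            · exact Or.inr (Or.inl ⟨by omega, by omega⟩)
            · exact Or.inr (Or.inr ⟨u, hu', hx⟩)
    · rw [if_neg hle]
      have hpw' : (pvExpand (front ++ [(ps, pe)])).Pairwise (· < ·) :=
        pvInv_pairwise front ps pe hpw hlt
      have hlt' : ∀ x ∈ pvExpand (front ++ [(ps, pe)]), x < t.1 := by
        intro x hx
        rcases mem_pvExpand_concat.mp hx with h | ⟨h1', h2'⟩
        · have := hlt x h; omega
        · omega
      obtain ⟨c1, c2⟩ := ih (front ++ [(ps, pe)]) t.1 t.2 hs_rest
        (fun u hu => hne u (List.mem_cons_of_mem _ hu)) hs_head hne_t hpw' hlt'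
      refine ⟨c1, fun x => ?_⟩
      rw [c2 x, mem_pvExpand_concat]
      constructor
      · rintro ((h | ⟨h1', h2'⟩) | ⟨h1', h2'⟩ | ⟨u, hu, hx⟩)
        · exact Or.inl h
        · exact Or.inr (Or.inl ⟨h1', h2'⟩)
        · exact Or.inr (Or.inr ⟨t, List.mem_cons_self .., h1', h2'⟩)
        · exact Or.inr (Or.inr ⟨u, List.mem_cons_of_mem _ hu, hx⟩)
      · rintro (h | ⟨h1', h2'⟩ | ⟨u, hu, hx⟩)
        · exact Or.inl (Or.inl h)
        · exact Or.inl (Or.inr ⟨h1', h2'⟩)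
        · rcases List.mem_cons.mp hu with rfl | hu'
          · exact Or.inr (Or.inl hx)
          · exact Or.inr (Or.inr ⟨u, hu', hx⟩)

-- the whole merging loop: its expansion is strictly increasing and covers the intervals
theorem pvMergeAll (is : List (Int × Int))
    (hs : is.Pairwise (fun a b => a.1 ≤ b.1))
    (hne : ∀ t ∈ is, t.1 ≤ t.2) :
    (pvExpand (is.foldl pvMergeStep [])).Pairwise (· < ·) ∧
    (∀ x, x ∈ pvExpand (is.foldl pvMergeStep []) ↔ ∃ t ∈ is, t.1 ≤ x ∧ x ≤ t.2) := by
  cases is with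
  | nil => exact ⟨by simp [pvExpand], by simp [pvExpand]⟩
  | cons t rest =>
    have hstep : List.foldl pvMergeStep [] (t :: rest) =
        List.foldl pvMergeStep ([] ++ [(t.1, t.2)]) rest := by
      simp [pvMergeStep]
    rw [hstep]
    obtain ⟨c1, c2⟩ := pvMerge_main rest [] t.1 t.2 hs.of_cons
      (fun u hu => hne u (List.mem_cons_of_mem _ hu)) ((List.pairwise_cons.mp hs).1)
      (hne t (List.mem_cons_self ..)) (by simp [pvExpand]) (by simp [pvExpand])
    refine ⟨c1, fun x => ?_⟩
    rw [c2 x]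
    constructor
    · rintro (h | ⟨h1', h2'⟩ | ⟨u, hu, hx⟩)
      · simp [pvExpand] at h
      · exact ⟨t, List.mem_cons_self .., h1', h2'⟩
      · exact ⟨u, List.mem_cons_of_mem _ hu, hx⟩
    · rintro ⟨u, hu, hx⟩
      rcases List.mem_cons.mp hu with rfl | hu'
      · exact Or.inr (Or.inl hx)
      · exact Or.inr (Or.inr ⟨u, hu', hx⟩)

-- ===== VERDICT (by name: the statement is the Claim_ definition above) =====
theorem generate_paratope_formats_spec : Claim_equal_generate_paratope_formats := by
  intro cdr _
  unfold Spec_generate_paratope_formats generate_paratope_formats generate_paratope_formats_alt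
  set vs := (PySem.Dict.ofList cdr).values with hvs
  have hall : vs.foldl (fun acc se => acc ++ PySem.List.pyRange se.1 (se.2 + 1) 1) [] =
      pvExpand vs := by
    simpa [pvExpand] using
      PySem.List.foldl_append_eq_flatMap (fun t : Int × Int => PySem.List.pyRange t.1 (t.2 + 1) 1) vs []
  set intervals := PySem.List.sorted (vs.filter (fun t => decide (t.1 ≤ t.2))) (fun t => t.1) false with hints
  set merged := intervals.foldl pvMergeStep [] with hmerged
  have hpos : merged.foldl (fun acc t => acc ++ PySem.List.pyRange t.1 (t.2 + 1) 1) [] =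
      pvExpand merged := by
    simpa [pvExpand] using
      PySem.List.foldl_append_eq_flatMap (fun t : Int × Int => PySem.List.pyRange t.1 (t.2 + 1) 1) merged []
  have hs : intervals.Pairwise (fun a b => a.1 ≤ b.1) := PySem.List.sorted_pairwise ..
  have hne : ∀ t ∈ intervals, t.1 ≤ t.2 := by
    intro t ht
    have := (List.mem_filter.mp ((PySem.List.mem_sorted ..).mp ht)).2
    simpa using this
  obtain ⟨c1, c2⟩ := pvMergeAll intervals hs hne
  have hmem : ∀ x : Int, x ∈ pvExpand merged ↔ x ∈ PySem.Set.ofList (pvExpand vs) := by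
    intro x
    rw [c2 x, PySem.Set.mem_ofList, mem_pvExpand]
    constructor
    · rintro ⟨t, ht, hx⟩
      exact ⟨t, (List.mem_filter.mp ((PySem.List.mem_sorted ..).mp ht)).1, hx⟩
    · rintro ⟨t, ht, hx⟩
      refine ⟨t, (PySem.List.mem_sorted ..).mpr (List.mem_filter.mpr ⟨ht, by simp; omega⟩), hx⟩
  have hperm : (pvExpand merged).Perm (PySem.Set.ofList (pvExpand vs)) := by
    refine (List.perm_ext_iff_of_nodup ?_ (PySem.Set.nodup_ofList _)).mpr hmem
    exact c1.imp (fun h => ne_of_lt h)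
  have hkey : PySem.List.sorted (PySem.Set.ofList (pvExpand vs)) (fun x => x) false =
      pvExpand merged :=
    PySem.List.sorted_eq_of_perm_of_pairwise_lt _ _ (fun x => x) hperm c1
  simp only [hall, hkey, ← hmerged, hpos]
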